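-- pv_equiv track=rewrite | github.com/beetrootfarmer/TIL | Algorithm/Algorithm_매일알고/EA/2/sol.py | solution
-- ===== SOURCE A (Python) =====
-- def solution(num):
--     answer = 0
--     for i in range(1,num+1):
--         strnum = str(i)
--         if '3' in strnum:
--             answer += 1
--         elif '6' in strnum:
--             answer += 1
--         elif '9' in strnum:
--             answer += 1
--
--     return answer
-- ===== SOURCE B (Python) =====
-- def solution(num):
--     if num <= 0:
--         return 0
--     return num - _avoiders_le(num) + 1
--
--
-- def _has369(q):
--     while q > 0:
--         if q % 10 in (3, 6, 9):
--             return True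
--         q //= 10
--     return False
--
--
-- def _allowed_le(r):
--     return sum(1 for d in range(r + 1) if d not in (3, 6, 9))
--
--
-- def _avoiders_le(n):
--     # count of k in [0, n] whose decimal digits avoid 3, 6 and 9
--     if n < 10:
--         return _allowed_le(n)
--     q, r = divmod(n, 10)
--     return 7 * _avoiders_le(q - 1) + (0 if _has369(q) else _allowed_le(r))
-- ===== Notes on version B (the rewrite author's own statement) =====
-- stated objective: faster
-- what changed: Replaces the per-number loop that stringifies every i in 1..num with a digit-DP: it counts the complement (numbers whose decimal digits avoid 3,6,9) by a base-7 style recursion over the digits of num and returns num minus that count.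
import Mathlib
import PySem

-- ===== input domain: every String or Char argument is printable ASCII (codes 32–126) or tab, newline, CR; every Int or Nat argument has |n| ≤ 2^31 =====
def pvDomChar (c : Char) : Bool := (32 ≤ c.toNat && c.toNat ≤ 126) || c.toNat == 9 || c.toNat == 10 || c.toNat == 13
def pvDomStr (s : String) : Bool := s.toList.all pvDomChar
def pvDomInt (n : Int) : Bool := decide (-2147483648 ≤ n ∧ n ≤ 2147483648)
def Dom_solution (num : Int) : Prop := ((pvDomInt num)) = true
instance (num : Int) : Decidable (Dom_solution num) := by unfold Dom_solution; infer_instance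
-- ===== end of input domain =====

-- B replaces A's per-number loop (stringify every i in 1..num) with a digit-DP that counts the
-- complement — the numbers in [0, num] avoiding the digits 3, 6, 9 — by recursion over num's digits (faster).

-- ===== PORT A =====
def solution (num : Int) : Int :=
  (PySem.List.pyRange 1 (num + 1) 1).foldl (fun answer i =>
    let strnum := PySem.Int.toStr i
    if PySem.Str.isIn "3" strnum then answer + 1
    else if PySem.Str.isIn "6" strnum then answer + 1
    else if PySem.Str.isIn "9" strnum then answer + 1
    else answer) 0

-- ===== PORT B =====
-- B-side helpers (transliterations of Source B's _has369, _allowed_le, _avoiders_le; all their values are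
-- nonnegative, so they live on Nat and solution_alt converts once at the boundary)
def has369 (q : Nat) : Bool :=
  if _h : q = 0 then false
  else if q % 10 = 3 ∨ q % 10 = 6 ∨ q % 10 = 9 then true
  else has369 (q / 10)
  termination_by q
  decreasing_by exact Nat.div_lt_self (Nat.pos_of_ne_zero _h) (by norm_num)

def allowedLe (r : Nat) : Nat :=
  (List.range (r + 1)).countP (fun d => !(d = 3 ∨ d = 6 ∨ d = 9 : Bool))

def avoidersLe (n : Nat) : Nat :=
  if _h : n < 10 then allowedLe n
  else 7 * avoidersLe (n / 10 - 1) + (if has369 (n / 10) then 0 else allowedLe (n % 10))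
  termination_by n
  decreasing_by
    have h10 : n / 10 < n := Nat.div_lt_self (by omega) (by norm_num)
    omega

def solution_alt (num : Int) : Int :=
  if num ≤ 0 then 0 else num - (avoidersLe num.toNat : Int) + 1

-- ===== PRECONDITION & SPEC =====
def Spec_solution (num : Int) (out : Int) : Prop := out = solution_alt num
instance (num : Int) (out : Int) : Decidable (Spec_solution num out) := by unfold Spec_solution; infer_instance

-- ===== CLAIM (what is proved, stated in full; the proofs are below) =====
def Claim_equal_solution : Prop := ∀ (num : Int), Dom_solution num → Spec_solution num (solution num)

-- ===== LEMMAS AND PROOFS =====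

-- A's loop body, named so the loop can be peeled
def stepA (answer i : Int) : Int :=
  if PySem.Str.isIn "3" (PySem.Int.toStr i) then answer + 1
  else if PySem.Str.isIn "6" (PySem.Int.toStr i) then answer + 1
  else if PySem.Str.isIn "9" (PySem.Int.toStr i) then answer + 1
  else answer

lemma solution_eq_foldl (num : Int) :
    solution num = (PySem.List.pyRange 1 (num + 1) 1).foldl stepA 0 := rfl

-- unfolding lemmas for the recursions
lemma has369_pos {m : Nat} (hm : m ≠ 0) :
    has369 m = if m % 10 = 3 ∨ m % 10 = 6 ∨ m % 10 = 9 then true else has369 (m / 10) := by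
  rw [has369]; simp [hm]

lemma avoidersLe_small {n : Nat} (h : n < 10) : avoidersLe n = allowedLe n := by
  rw [avoidersLe]; simp [h]

lemma avoidersLe_big {n : Nat} (h : ¬ n < 10) :
    avoidersLe n = 7 * avoidersLe (n / 10 - 1) +
      (if has369 (n / 10) then 0 else allowedLe (n % 10)) := by
  rw [avoidersLe]; simp [h]

lemma has369_small {m : Nat} (h : m < 10) : has369 m = decide (m = 3 ∨ m = 6 ∨ m = 9) := by
  by_cases h0 : m = 0
  · subst h0; simp [has369]
  · rw [has369_pos h0, Nat.mod_eq_of_lt h, Nat.div_eq_of_lt h]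
    by_cases hm : m = 3 ∨ m = 6 ∨ m = 9
    · simp [hm]
    · simp [hm, has369]

-- has369 reads exactly the decimal digits
lemma has369_digits (m : Nat) :
    has369 m = decide (3 ∈ Nat.digits 10 m ∨ 6 ∈ Nat.digits 10 m ∨ 9 ∈ Nat.digits 10 m) := by
  induction m using Nat.strong_induction_on with
  | _ m ih =>
    rcases Nat.eq_zero_or_pos m with h0 | hpos
    · subst h0; simp [has369]
    · rw [has369_pos (by omega), Nat.digits_def' (by norm_num) hpos,
        ih (m / 10) (Nat.div_lt_self hpos (by norm_num))]
      by_cases h : m % 10 = 3 ∨ m % 10 = 6 ∨ m % 10 = 9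
      · simp [h]; tauto
      · simp only [if_neg h]
        have h3 : ¬ (3 = m % 10) := by omega
        have h6 : ¬ (6 = m % 10) := by omega
        have h9 : ¬ (9 = m % 10) := by omega
        simp [List.mem_cons, h3, h6, h9]

-- Nat.toDigitsCore writes the reversed digit list (enough fuel, positive input)
lemma toDigitsCore_eq (fuel : Nat) : ∀ (n : Nat) (ds : List Char), 0 < n → n < 10 ^ fuel →
    Nat.toDigitsCore 10 fuel n ds = ((Nat.digits 10 n).map Nat.digitChar).reverse ++ ds := by
  induction fuel with
  | zero => intro n ds hn hlt; simp at hlt; omega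
  | succ fuel ih =>
    intro n ds hn hlt
    rw [Nat.toDigitsCore]
    rw [Nat.digits_def' (b := 10) (by norm_num) hn]
    by_cases h : n / 10 = 0
    · simp [h, Nat.digits_zero]
    · rw [if_neg h, ih (n / 10) _ (by omega)
        (Nat.div_lt_of_lt_mul (by rw [pow_succ] at hlt; omega))]
      simp

lemma toDigits_eq {m : Nat} (hm : 0 < m) :
    Nat.toDigits 10 m = ((Nat.digits 10 m).map Nat.digitChar).reverse := by
  have : m < 10 ^ (m + 1) := by
    calc m < 10 ^ m := Nat.lt_pow_self (by norm_num)
    _ ≤ 10 ^ (m + 1) := Nat.pow_le_pow_right (by norm_num) (by omega)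
  simpa using toDigitsCore_eq (m + 1) m [] hm this

-- digitChar membership in str(m) is digit membership (for one-digit t)
lemma mem_toDigits_iff {m t : Nat} (hm : 0 < m) (ht : t < 10) :
    Nat.digitChar t ∈ Nat.toDigits 10 m ↔ t ∈ Nat.digits 10 m := by
  rw [toDigits_eq hm]
  simp only [List.mem_reverse, List.mem_map]
  constructor
  · rintro ⟨d, hd, hdc⟩
    have hdlt : d < 10 := Nat.digits_lt_base (by norm_num) hd
    have hdt : d = t := by
      interval_cases d <;> interval_cases t <;>
        first | rfl | (exact absurd hdc (by decide))
    exact hdt ▸ hd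
  · intro h; exact ⟨t, h, rfl⟩

-- the A-side membership test, numerically
lemma isIn_digit (m t : Nat) (sub : String) (hm : 0 < m) (ht : t < 10)
    (hsub : sub.toList = [Nat.digitChar t]) :
    PySem.Str.isIn sub (PySem.Int.toStr ((m : Nat) : Int)) = decide (t ∈ Nat.digits 10 m) := by
  have h1 : (PySem.Int.toStr ((m : Nat) : Int)).toList = Nat.toDigits 10 m := by
    rw [PySem.Int.toList_toStr, PySem.Int.toChars]
    simp
  have hiff : PySem.Str.isIn sub (PySem.Int.toStr ((m : Nat) : Int)) = true ↔
      t ∈ Nat.digits 10 m := by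
    rw [PySem.Str.isIn_iff_infix, hsub, h1, List.singleton_infix_iff]
    exact mem_toDigits_iff hm ht
  by_cases hmem : t ∈ Nat.digits 10 m
  · rw [hiff.2 hmem, decide_eq_true hmem]
  · have hf : PySem.Str.isIn sub (PySem.Int.toStr ((m : Nat) : Int)) = false := by
      rw [← Bool.not_eq_true, hiff]; exact hmem
    rw [hf, decide_eq_false hmem]

-- A's loop body counts exactly the numbers whose digits meet 3, 6 or 9
lemma stepA_eq (a : Int) (m : Nat) (hm : 0 < m) :
    stepA a ((m : Nat) : Int) = a + (if has369 m then 1 else 0) := by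
  unfold stepA
  rw [isIn_digit m 3 "3" hm (by norm_num) (by decide),
      isIn_digit m 6 "6" hm (by norm_num) (by decide),
      isIn_digit m 9 "9" hm (by norm_num) (by decide),
      has369_digits m]
  by_cases h3 : 3 ∈ Nat.digits 10 m <;> by_cases h6 : 6 ∈ Nat.digits 10 m <;>
    by_cases h9 : 9 ∈ Nat.digits 10 m <;> simp [h3, h6, h9]

-- the central recurrence: avoidersLe counts one more exactly when n+1 avoids 3/6/9
lemma avoidersLe_succ : ∀ n : Nat,
    avoidersLe (n + 1) = avoidersLe n + (if has369 (n + 1) then 0 else 1) := by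
  intro n
  induction n using Nat.strong_induction_on with
  | _ n ih =>
    by_cases hsmall : n + 1 < 10
    · have hn8 : n ≤ 8 := by omega
      interval_cases n <;>
        rw [avoidersLe_small (by norm_num), avoidersLe_small (by norm_num),
          has369_small (by norm_num)] <;> decide
    · by_cases h10 : n + 1 = 10
      · have h9 : n = 9 := by omega
        subst h9
        have hb1 : has369 1 = false := by rw [has369_small (by norm_num)]; decide
        have hb : has369 10 = false := by
          rw [has369_pos (by norm_num)]; norm_num [hb1]
        have e : avoidersLe 10 = 7 * avoidersLe 0 + (if has369 1 then 0 else allowedLe 0) := by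
          rw [avoidersLe_big (by norm_num)]
        rw [show (9 : Nat) + 1 = 10 from rfl, e, avoidersLe_small (by norm_num),
          avoidersLe_small (by norm_num), hb, hb1]
        decide
      · -- n + 1 ≥ 11
        have hdivlt : (n + 1) / 10 < n + 1 := Nat.div_lt_self (by omega) (by norm_num)
        by_cases hr : (n + 1) % 10 = 0
        · -- last digit 0, so n + 1 ≥ 20 and n ends in 9
          have h20 : n + 1 ≥ 20 := by omega
          have e1 := avoidersLe_big (n := n + 1) (by omega)
          have e2 := avoidersLe_big (n := n) (by omega)
          have hq1 : n / 10 = (n + 1) / 10 - 1 := by omega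
          have hr9 : n % 10 = 9 := by omega
          rw [hq1, hr9] at e2
          have hq2 : (n + 1) / 10 - 1 - 1 = (n + 1) / 10 - 2 := by omega
          rw [hq2] at e2
          have hIH := ih ((n + 1) / 10 - 2) (by omega)
          have hq3 : (n + 1) / 10 - 2 + 1 = (n + 1) / 10 - 1 := by omega
          rw [hq3] at hIH
          have h369 : has369 (n + 1) = has369 ((n + 1) / 10) := by
            rw [has369_pos (by omega), hr]; simp
          have hA0 : allowedLe ((n + 1) % 10) = 1 := by rw [hr]; decide
          have hA9 : allowedLe 9 = 7 := by decide
          rw [e1, e2, h369, hA0, hA9, hIH]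
          by_cases hb1 : has369 ((n + 1) / 10 - 1) <;>
            by_cases hb2 : has369 ((n + 1) / 10) <;> simp [hb1, hb2] <;> ring
        · -- last digit ≥ 1: same quotient, allowedLe moves by the new last digit
          have e1 := avoidersLe_big (n := n + 1) (by omega)
          have e2 := avoidersLe_big (n := n) (by omega)
          have hq : n / 10 = (n + 1) / 10 := by omega
          have hrr : (n + 1) % 10 = n % 10 + 1 := by omega
          rw [hq] at e2
          have hb : n % 10 ≤ 8 := by omega
          have hA : allowedLe (n % 10 + 1) = allowedLe (n % 10) +
              (if n % 10 + 1 = 3 ∨ n % 10 + 1 = 6 ∨ n % 10 + 1 = 9 then 0 else 1) := by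
            set r := n % 10 with hrdef
            interval_cases r <;> decide
          have h369 : has369 (n + 1) =
              (if n % 10 + 1 = 3 ∨ n % 10 + 1 = 6 ∨ n % 10 + 1 = 9 then true
               else has369 ((n + 1) / 10)) := by
            rw [has369_pos (by omega), hrr]
          rw [e1, e2, hrr, hA, h369]
          split_ifs <;> simp_all <;> omega

-- the loop value, in closed form
lemma loop_eq (n : Nat) :
    (PySem.List.pyRange 1 ((n : Int) + 1) 1).foldl stepA 0 = (n : Int) + 1 - (avoidersLe n : Int) := by
  induction n with
  | zero =>
    rw [PySem.List.pyRange_one_eq_nil (by omega)]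
    have h0 : avoidersLe 0 = 1 := by
      rw [avoidersLe_small (by norm_num)]; decide
    simp [h0]
  | succ n ihn =>
    push_cast
    rw [PySem.List.pyRange_one_succ_right (by omega), List.foldl_append, ihn,
      List.foldl_cons, List.foldl_nil]
    rw [show (n : Int) + 1 = ((n + 1 : Nat) : Int) by push_cast; ring]
    rw [stepA_eq _ (n + 1) (by omega)]
    have hrec := avoidersLe_succ n
    by_cases hb : has369 (n + 1) <;> simp [hb] at hrec ⊢ <;> push_cast [hrec] <;> ring

-- ===== VERDICT (by name: the statement is the Claim_ definition above) =====
theorem solution_spec : Claim_equal_solution := by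
  intro num _
  unfold Spec_solution solution_alt
  by_cases h : num ≤ 0
  · rw [if_pos h, solution_eq_foldl, PySem.List.pyRange_one_eq_nil (by omega)]
    rfl
  · rw [if_neg h]
    obtain ⟨n, rfl⟩ : ∃ n : Nat, num = (n : Int) := ⟨num.toNat, by omega⟩
    rw [solution_eq_foldl, loop_eq n]
    simp
    ring
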